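-- pv_equiv track=rewrite | github.com/Thomas-bssnt/Project-Euler | problems/05.py | solution
-- ===== SOURCE A (Python) =====
-- def is_prime(number):
--     if number in (0, 1):
--         return False
--     for i in range(2, number):
--         if number % i == 0:
--             return False
--     return True
--
-- def solution(numbers):
--     result = 1
--     for number in numbers:
--         if is_prime(number):
--             power = 1
--             while number ** power <= max(numbers):
--                 result *= number
--                 power += 1
--     return result
-- ===== SOURCE B (Python) =====
-- def _is_prime(n):
--     # trial division up to the square root (empty loop for n < 4, so n in (0,1) is
--     # the only explicit non-prime guard, as in A)
--     if 0 <= n <= 1: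
--         return False
--     d = 2
--     while d * d <= n:
--         if n % d == 0:
--             return False
--         d += 1
--     return True
--
-- def solution(numbers):
--     if not numbers:
--         return 1
--     m = max(numbers)
--     result = 1
--     for n in numbers:
--         if _is_prime(n):
--             p = n
--             while p * n <= m:
--                 p *= n
--             result *= p
--     return result
-- ===== Notes on version B (the rewrite author's own statement) =====
-- stated objective: faster
-- what changed: B computes max(numbers) once instead of re-evaluating it at every iteration of the inner while loop, tests primality by trial division only up to the square root instead of up to number-1, and accumulates the prime power p directly (result *= p) instead of multiplying result once per exponent step.
import Mathlib
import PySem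

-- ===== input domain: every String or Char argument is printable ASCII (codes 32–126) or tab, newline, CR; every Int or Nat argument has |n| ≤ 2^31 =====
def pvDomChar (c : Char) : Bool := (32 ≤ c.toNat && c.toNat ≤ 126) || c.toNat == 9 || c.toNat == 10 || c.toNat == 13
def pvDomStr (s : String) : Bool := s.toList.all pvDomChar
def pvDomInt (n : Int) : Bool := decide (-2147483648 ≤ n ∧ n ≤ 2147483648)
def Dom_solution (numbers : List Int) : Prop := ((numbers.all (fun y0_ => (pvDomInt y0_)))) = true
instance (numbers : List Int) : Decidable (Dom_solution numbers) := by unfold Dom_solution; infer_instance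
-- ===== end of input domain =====

-- B computes max(numbers) once, tests primality only up to the square root, and
-- multiplies the accumulated prime power in one step (asymptotically cheaper).


-- ===== PORT A =====
-- A's is_prime: `number in (0, 1)` guard, then `for i in range(2, number)` with its
-- early `return False`; the range is traversed lazily (as Python's range is), as a
-- recursion on the (number - 2).toNat values it yields, counting i up from 2.
def forA (number : Int) : Nat → Int → Bool
  | 0, _ => true
  | left + 1, i =>
    if PySem.Int.mod number i = 0 then false else forA number left (i + 1)

def isPrimeA (number : Int) : Bool :=
  if number = 0 ∨ number = 1 then false
  else forA number (number - 2).toNat 2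

-- A's inner `while number ** power <= max(numbers)` loop; `max(numbers)` is re-evaluated
-- at every check, exactly as in A (the `.getD 0` default is never reached: the loop only
-- runs for a member of `numbers`, so the list is nonempty).  The fuel guard only makes
-- the loop total; 100 is ample on Dom wherever Python A's loop terminates.
def loopA (numbers : List Int) (number result : Int) (power : Nat) : Nat → Int
  | 0 => result
  | fuel + 1 =>
    if number ^ power ≤ (PySem.List.max? numbers id).getD 0 then
      loopA numbers number (result * number) (power + 1) fuel
    else result

def solution (numbers : List Int) : Int :=
  numbers.foldl (fun result number =>
    if isPrimeA number then loopA numbers number result 1 100 else result) 1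

-- ===== PORT B =====
-- B's _is_prime: `while d * d <= n` trial division up to the square root.
-- The fuel n.natAbs + 2 only makes the loop total; it is always sufficient,
-- since the loop exits at the latest once d exceeds n.
def trialB (n : Int) : Nat → Int → Bool
  | 0, _ => true
  | fuel + 1, d =>
    if d * d ≤ n then
      (if PySem.Int.mod n d = 0 then false else trialB n fuel (d + 1))
    else true

def isPrimeB (n : Int) : Bool :=
  if 0 ≤ n ∧ n ≤ 1 then false else trialB n (n.natAbs + 2) 2

-- B's `while p * n <= m` loop (fuel guard for totality only; ample on Dom wherever
-- Python B's loop terminates).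
def loopB (m n : Int) : Int → Nat → Int
  | p, 0 => p
  | p, fuel + 1 => if p * n ≤ m then loopB m n (p * n) fuel else p

def solution_alt (numbers : List Int) : Int :=
  match PySem.List.max? numbers id with
  | none => 1            -- `if not numbers: return 1`
  | some m =>
    numbers.foldl (fun result n =>
      if isPrimeB n then result * loopB m n n 99 else result) 1

-- ===== PRECONDITION & SPEC =====
-- (No Pre_: the fuelled ports agree on every input.  On lists containing -1 together
-- with a positive element both Pythons diverge, so neither returns a value there.)
def Spec_solution (numbers : List Int) (out : Int) : Prop := out = solution_alt numbers
instance (numbers : List Int) (out : Int) : Decidable (Spec_solution numbers out) := by unfold Spec_solution; infer_instance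

-- ===== CLAIM (what is proved, stated in full; the proofs are below) =====
def Claim_equal_solution : Prop := ∀ (numbers : List Int), Dom_solution numbers → Spec_solution numbers (solution numbers)

-- ===== LEMMAS AND PROOFS =====

-- forA returns false exactly when some j with i ≤ j < i + fuel divides n
lemma forA_false_iff (n : Int) :
    ∀ (f : Nat) (i : Int),
      (forA n f i = false ↔ ∃ j : Int, i ≤ j ∧ j < i + (f : Int) ∧ PySem.Int.mod n j = 0) := by
  intro f
  induction f with
  | zero =>
      intro i
      simp only [forA]
      constructor
      · intro h; exact absurd h (by simp)
      · rintro ⟨j, h1, h2, _⟩; exfalso; push_cast at h2; omega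
  | succ f ih =>
      intro i
      simp only [forA]
      split_ifs with h1
      · constructor
        · intro _; exact ⟨i, le_refl i, by push_cast; omega, h1⟩
        · intro _; rfl
      · rw [ih (i + 1)]
        constructor
        · rintro ⟨j, hj1, hj2, hj3⟩
          exact ⟨j, by omega, by push_cast at hj2 ⊢; omega, hj3⟩
        · rintro ⟨j, hj1, hj2, hj3⟩
          refine ⟨j, ?_, by push_cast at hj2 ⊢; omega, hj3⟩
          rcases eq_or_lt_of_le hj1 with h | h
          · exact absurd (h ▸ hj3) h1
          · omega

-- trialB returns false exactly when n has a divisor e with d ≤ e and e * e ≤ n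
-- (given enough fuel and 2 ≤ d).
lemma trialB_false_iff (n : Int) :
    ∀ (f : Nat) (d : Int), 2 ≤ d → n < d + (f : Int) →
      (trialB n f d = false ↔ ∃ e : Int, d ≤ e ∧ e * e ≤ n ∧ PySem.Int.mod n e = 0) := by
  intro f
  induction f with
  | zero =>
      intro d hd hf
      simp only [trialB]
      constructor
      · intro h; exact absurd h (by simp)
      · rintro ⟨e, h1, h2, _⟩; exfalso; push_cast at hf; nlinarith
  | succ f ih =>
      intro d hd hf
      simp only [trialB]
      split_ifs with h1 h2
      · constructor
        · intro _; exact ⟨d, le_refl d, h1, h2⟩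
        · intro _; rfl
      · rw [ih (d + 1) (by omega) (by push_cast at hf ⊢; omega)]
        constructor
        · rintro ⟨e, he1, he2, he3⟩; exact ⟨e, by omega, he2, he3⟩
        · rintro ⟨e, he1, he2, he3⟩
          refine ⟨e, ?_, he2, he3⟩
          rcases eq_or_lt_of_le he1 with h | h
          · exact absurd (h ▸ he3) h2
          · omega
      · constructor
        · intro h; exact absurd h (by simp)
        · rintro ⟨e, he1, he2, _⟩; exfalso; nlinarith

-- a proper divisor below n exists iff one below sqrt n exists
lemma sqrt_bridge (n : Int) (hn : 2 ≤ n) :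
    (∃ i : Int, 2 ≤ i ∧ i < n ∧ PySem.Int.mod n i = 0) ↔
      (∃ e : Int, 2 ≤ e ∧ e * e ≤ n ∧ PySem.Int.mod n e = 0) := by
  constructor
  · rintro ⟨i, hi2, hin, him⟩
    obtain ⟨q, hq⟩ := (PySem.Int.mod_eq_zero_iff_dvd n i).1 him
    have hipos : 0 < i := by omega
    have hqpos : 0 < q := by nlinarith
    have hq2 : 2 ≤ q := by nlinarith
    by_cases hii : i * i ≤ n
    · exact ⟨i, hi2, hii, him⟩
    · refine ⟨q, hq2, ?_, (PySem.Int.mod_eq_zero_iff_dvd n q).2 ⟨i, by linarith [hq, mul_comm i q]⟩⟩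
      have hqi : q < i := by nlinarith
      nlinarith
  · rintro ⟨e, he2, hee, hem⟩
    exact ⟨e, he2, by nlinarith, hem⟩

-- the two primality tests agree on every integer
lemma isPrime_eq (n : Int) : isPrimeA n = isPrimeB n := by
  unfold isPrimeA isPrimeB
  by_cases h : n = 0 ∨ n = 1
  · rw [if_pos h, if_pos (by omega)]
  · rw [if_neg h, if_neg (by omega)]
    by_cases hn : n < 2
    · have hr : (n - 2).toNat = 0 := by omega
      have ht : trialB n (n.natAbs + 2) 2 = true := by
        show trialB n (n.natAbs + 1 + 1) 2 = true
        simp only [trialB]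
        rw [if_neg (by omega)]
      rw [hr, ht]; rfl
    · rw [not_lt] at hn
      have hA : (forA n (n - 2).toNat 2 = false) ↔
          ∃ i : Int, 2 ≤ i ∧ i < n ∧ PySem.Int.mod n i = 0 := by
        rw [forA_false_iff n (n - 2).toNat 2]
        have hb : (2 : Int) + (((n - 2).toNat : Nat) : Int) = n := by omega
        rw [hb]
      have hB := trialB_false_iff n (n.natAbs + 2) 2 (le_refl 2)
        (by omega)
      have key : (forA n (n - 2).toNat 2 = false) ↔
          (trialB n (n.natAbs + 2) 2 = false) :=
        hA.trans ((sqrt_bridge n hn).trans hB.symm)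
      cases h1 : forA n (n - 2).toNat 2 <;>
        cases h2 : trialB n (n.natAbs + 2) 2 <;> simp_all

-- number of consecutive successful checks n ^ e ≤ m, n ^ (e+1) ≤ m, …, fuel-bounded
def runlen (m n : Int) : Nat → Nat → Nat
  | _, 0 => 0
  | e, f + 1 => if n ^ e ≤ m then runlen m n (e + 1) f + 1 else 0

lemma loopA_eq (numbers : List Int) (n m : Int)
    (hm : (PySem.List.max? numbers id).getD 0 = m) :
    ∀ (f : Nat) (r : Int) (e : Nat), loopA numbers n r e f = r * n ^ runlen m n e f := by
  intro f
  induction f with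
  | zero => intro r e; simp [loopA, runlen]
  | succ f ih =>
      intro r e
      simp only [loopA, runlen, hm]
      split_ifs with h
      · rw [ih (r * n) (e + 1), pow_succ]; ring
      · simp

lemma loopB_eq (m n : Int) :
    ∀ (f : Nat) (e : Nat), loopB m n (n ^ e) f = n ^ (e + runlen m n (e + 1) f) := by
  intro f
  induction f with
  | zero => intro e; simp [loopB, runlen]
  | succ f ih =>
      intro e
      simp only [loopB]
      rw [← pow_succ]
      split_ifs with h
      · rw [ih (e + 1)]
        simp only [runlen, if_pos h]
        congr 1
        omega
      · simp [runlen, if_neg h]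

-- the two inner loops contribute the same factor once n ≤ max(numbers)
lemma loop_agree (numbers : List Int) (n m r : Int)
    (hm : (PySem.List.max? numbers id).getD 0 = m) (hnm : n ≤ m) :
    loopA numbers n r 1 100 = r * loopB m n n 99 := by
  rw [loopA_eq numbers n m hm 100 r 1]
  have hb : loopB m n n 99 = n ^ (1 + runlen m n 2 99) := by
    have := loopB_eq m n 99 1
    rwa [pow_one] at this
  have ha : runlen m n 1 100 = runlen m n 2 99 + 1 := by
    show (if n ^ 1 ≤ m then runlen m n 2 99 + 1 else 0) = runlen m n 2 99 + 1
    rw [if_pos (by rwa [pow_one])]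
  rw [ha, hb, Nat.add_comm]

-- ===== VERDICT (by name: the statement is the Claim_ definition above) =====
theorem solution_spec : Claim_equal_solution := by
  unfold Claim_equal_solution
  intro numbers _
  unfold Spec_solution solution solution_alt
  cases hmax : PySem.List.max? numbers id with
  | none => rw [(PySem.List.max?_eq_none_iff numbers id).1 hmax]; rfl
  | some m =>
      apply PySem.List.foldl_congr_mem
      intro acc x hx
      rw [isPrime_eq x]
      by_cases hp : isPrimeB x = true
      · rw [if_pos hp, if_pos hp]
        exact loop_agree numbers x m acc (by rw [hmax]; rfl)
          (PySem.List.max?_isMax hmax x hx)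
      · rw [if_neg hp, if_neg hp]
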